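-- pv_equiv track=rewrite | github.com/KANG-build/solving | 프로그래머스/0/120871. 저주의 숫자 3/저주의 숫자 3.py | solution
-- ===== SOURCE A (Python) =====
-- def solution(n):
--     result = n
--     i = 0
--     while True:
--         i += 1
--         if '3' in str(i) or i % 3 == 0:
--             result += 1
--         if i == result:
--             break
--
--     return result
-- ===== SOURCE B (Python) =====
-- def solution(n):
--     # Walk the 3-free numbers directly: keep the decimal digits of the current
--     # 3-free number (least significant first) and its digit sum mod 3, and
--     # increment in "3-free decimal" (skip digit 3, carry past 9), counting the
--     # ones that are not divisible by 3 until the n-th is reached.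
--     count = 0
--     ds = [0]
--     s = 0
--     while count < n:
--         i = 0
--         while True:
--             if i == len(ds):
--                 ds.append(0)
--             d = ds[i] + 1
--             if d == 3:
--                 d = 4
--             if d == 10:
--                 s = (s - 9) % 3
--                 ds[i] = 0
--                 i += 1
--             else:
--                 s = (s + d - ds[i]) % 3
--                 ds[i] = d
--                 break
--         if s:
--             count += 1
--     v = 0
--     for d in reversed(ds):
--         v = 10 * v + d
--     return v
-- ===== Notes on version B (the rewrite author's own statement) =====
-- stated objective: alternative
-- what changed: A scans every integer, testing each with str() containment and a mod; B never looks at non-3-free numbers at all: it keeps the decimal digits of the current 3-free number and steps to the next one by an increment that skips digit 3 and carries past 9, counting those with digit sum not divisible by 3 (measured ~1.3-1.5x, below the 1.5x bar, so not claimed as faster).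
import Mathlib
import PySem

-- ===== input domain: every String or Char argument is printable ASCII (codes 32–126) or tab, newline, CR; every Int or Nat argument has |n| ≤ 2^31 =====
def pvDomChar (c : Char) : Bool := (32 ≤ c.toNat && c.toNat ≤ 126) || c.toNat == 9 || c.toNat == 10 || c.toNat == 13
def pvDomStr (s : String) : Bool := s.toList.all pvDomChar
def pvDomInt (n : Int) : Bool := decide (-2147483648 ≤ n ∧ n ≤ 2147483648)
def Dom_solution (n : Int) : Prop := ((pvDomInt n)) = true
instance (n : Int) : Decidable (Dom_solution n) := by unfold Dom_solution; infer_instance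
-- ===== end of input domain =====

-- B walks the 3-free numbers directly by a digit-list increment that skips digit 3,
-- instead of A's scan of every integer with a str() digit test; objective: alternative.

-- ===== PORT A =====
-- shared totality helper: hasThree n ⇔ the decimal digits of n contain a 3
def hasThree (n : Nat) : Bool := decide ('3' ∈ Nat.toDigits 10 n)

def validB (m : Nat) : Bool := !(hasThree m) && decide (m % 3 ≠ 0)

-- totality fuel for both ports: nthValid k is the k-th positive number that is
-- not divisible by 3 and has no digit 3 (used only as a proven-sufficient fuel;
-- A's and B's while-loops are transliterated below and shown to stop within it).
def searchValid : Nat → Nat → Nat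
  | 0, c => c
  | f + 1, c => if validB c then c else searchValid f (c + 1)

def nextValid (m : Nat) : Nat := searchValid (9 * m + 2) (m + 1)

def nthValidGo : Nat → Nat → Nat
  | 0, acc => acc
  | k + 1, acc => nthValidGo k (nextValid acc)

def nthValid (k : Nat) : Nat := nthValidGo k 0

-- A's while-loop: i += 1; if '3' in str(i) or i % 3 == 0: result += 1; if i == result: break
def loopA : Nat → Int → Int → Int
  | 0, _, result => result
  | f + 1, i, result =>
      let i1 := i + 1
      let result1 :=
        if PySem.Str.isIn "3" (PySem.Int.toStr i1) || (PySem.Int.mod i1 3 == 0)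
        then result + 1 else result
      if i1 == result1 then result1 else loopA f i1 result1

-- fuel (nthValid n.toNat + 1) is a totality guard only; for n ≥ 1 (Pre_) it is
-- proven sufficient below (for n ≤ 0 Python's A never terminates).
def solution (n : Int) : Int := loopA (nthValid n.toNat + 1) 0 n

-- ===== PORT B =====
-- inner while of Source B: add 1 in "3-free decimal" (digits least-significant first,
-- skip digit 3, carry past 9), threading s = digit sum mod 3 exactly as Source B does.
def incGo : List Int → Int → List Int × Int
  | [], s =>
      -- i == len(ds): ds.append(0); then d = 0+1 = 1, no skip, no carry
      ([1], PySem.Int.mod (s + 1 - 0) 3)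
  | d :: rest, s =>
      let d1 := d + 1
      let d2 := if d1 == 3 then 4 else d1
      if d2 == 10 then
        let p := incGo rest (PySem.Int.mod (s - 9) 3)
        (0 :: p.1, p.2)
      else
        (d2 :: rest, PySem.Int.mod (s + d2 - d) 3)

-- outer while of Source B; final 'for d in reversed(ds): v = 10*v + d'
def loopB (n : Int) : Nat → List Int → Int → Int → Int
  | 0, ds, _, _ => ds.reverse.foldl (fun v d => 10 * v + d) 0
  | f + 1, ds, s, count =>
      if count < n then
        let p := incGo ds s
        let count1 := if p.2 == 0 then count else count + 1
        loopB n f p.1 p.2 count1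
      else ds.reverse.foldl (fun v d => 10 * v + d) 0

-- fuel (nthValid n.toNat + 1) is the same totality guard, proven sufficient for n ≥ 1.
def solution_alt (n : Int) : Int := loopB n (nthValid n.toNat + 1) [0] 0 0

-- ===== PRECONDITION & SPEC =====
-- For n ≤ 0 Python's A loops forever (result never catches up with i), so A
-- returns exactly on n ≥ 1.
def Pre_solution (n : Int) : Prop := 1 ≤ n
instance (n : Int) : Decidable (Pre_solution n) := by unfold Pre_solution; infer_instance
def pvWitness_solution : Int := 1

def Spec_solution (n : Int) (out : Int) : Prop := out = solution_alt n
instance (n : Int) (out : Int) : Decidable (Spec_solution n out) := by unfold Spec_solution; infer_instance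

-- ===== CLAIM (what is proved, stated in full; the proofs are below) =====
def Claim_equal_solution : Prop := ∀ (n : Int), Dom_solution n → Pre_solution n → Spec_solution n (solution n)

-- ===== LEMMAS AND PROOFS =====

-- ---- decimal-digit characterization of Nat.toDigits ----
theorem toDigitsCore_fuel : ∀ f f' (n : Nat) (l : List Char), n < f → n < f' →
    Nat.toDigitsCore 10 f n l = Nat.toDigitsCore 10 f' n l := by
  intro f
  induction f with
  | zero => intro f' n l h; omega
  | succ f ih =>
    intro f' n l h h'
    cases f' with
    | zero => omega
    | succ f' =>
      simp only [Nat.toDigitsCore]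
      by_cases h0 : n / 10 = 0
      · simp [h0]
      · have hn : 10 ≤ n := by
          rcases Nat.lt_or_ge n 10 with hlt | hge
          · exact absurd (Nat.div_eq_of_lt hlt) h0
          · exact hge
        have hd : n / 10 < n := Nat.div_lt_self (by omega) (by omega)
        simp only [h0, if_false]
        exact ih f' (n / 10) _ (by omega) (by omega)

theorem toDigitsCore_append : ∀ f (n : Nat) (l : List Char),
    Nat.toDigitsCore 10 f n l = Nat.toDigitsCore 10 f n [] ++ l := by
  intro f
  induction f with
  | zero => intro n l; simp [Nat.toDigitsCore]
  | succ f ih =>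
    intro n l
    simp only [Nat.toDigitsCore]
    by_cases h0 : n / 10 = 0
    · simp [h0]
    · simp only [h0, if_false]
      rw [ih (n/10) ((n % 10).digitChar :: l), ih (n/10) [(n % 10).digitChar]]
      simp

theorem toDigits_lt {n : Nat} (h : n < 10) : Nat.toDigits 10 n = [Nat.digitChar n] := by
  simp only [Nat.toDigits, Nat.toDigitsCore, Nat.div_eq_of_lt h, if_true]
  rw [Nat.mod_eq_of_lt h]

theorem toDigits_ge {n : Nat} (h : 10 ≤ n) :
    Nat.toDigits 10 n = Nat.toDigits 10 (n / 10) ++ [Nat.digitChar (n % 10)] := by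
  have h0 : n / 10 ≠ 0 := by
    have : 1 ≤ n / 10 := (Nat.one_le_div_iff (by omega)).2 h
    omega
  show Nat.toDigitsCore 10 (n+1) n [] = _
  simp only [Nat.toDigitsCore, h0, if_false]
  rw [toDigitsCore_append n (n/10) [(n % 10).digitChar],
      toDigitsCore_fuel n (n/10 + 1) (n/10) [] (by
        have := Nat.div_lt_self (by omega : 0 < n) (by omega : 1 < 10); omega) (by omega)]
  rfl

theorem digitChar_eq_three_iff {d : Nat} (h : d < 10) : Nat.digitChar d = '3' ↔ d = 3 := by
  interval_cases d <;> simp [Nat.digitChar]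

theorem hasThree_lt {n : Nat} (h : n < 10) : hasThree n = decide (n = 3) := by
  simp only [hasThree, toDigits_lt h, List.mem_singleton]
  rw [decide_eq_decide]
  exact eq_comm.trans (digitChar_eq_three_iff h)

theorem hasThree_ge {n : Nat} (h : 10 ≤ n) :
    hasThree n = (decide (n % 10 = 3) || hasThree (n / 10)) := by
  simp only [hasThree, toDigits_ge h, List.mem_append, List.mem_singleton]
  simp only [Bool.decide_or, Bool.or_comm]
  congr 1
  rw [decide_eq_decide]
  exact eq_comm.trans (digitChar_eq_three_iff (Nat.mod_lt n (by omega)))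

-- ---- A's test equals ¬ validB ----
theorem cursed_eq (i : Nat) :
    (PySem.Str.isIn "3" (PySem.Int.toStr (i : Int)) || (PySem.Int.mod (i : Int) 3 == 0))
      = !(validB i) := by
  have h1 : PySem.Str.isIn "3" (PySem.Int.toStr (i : Int)) = hasThree i := by
    have : PySem.Str.isIn "3" (PySem.Int.toStr (i : Int)) = true ↔ hasThree i = true := by
      rw [PySem.Str.isIn_iff_infix, PySem.Int.toList_toStr]
      have : PySem.Int.toChars (i : Int) = Nat.toDigits 10 i := by
        simp [PySem.Int.toChars]
      rw [this]
      show ['3'] <:+: _ ↔ _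
      rw [List.singleton_infix_iff]
      simp [hasThree]
    exact Bool.coe_iff_coe.mp this
  have h2 : (PySem.Int.mod (i : Int) 3 == 0) = decide (i % 3 = 0) := by
    have : PySem.Int.mod (i : Int) 3 = ((i % 3 : Nat) : Int) := by
      exact_mod_cast PySem.Int.mod_natCast i 3
    rw [this]
    by_cases h : i % 3 = 0 <;> simp [h]
    omega
  rw [h1, h2]
  unfold validB
  cases hb : hasThree i <;> by_cases h : i % 3 = 0 <;> simp [h]

-- ---- counting valid numbers ----
def cntValid (i : Nat) : Nat := (List.range i).countP (fun k => validB (k + 1))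

theorem cntValid_succ (i : Nat) :
    cntValid (i + 1) = cntValid i + (if validB (i + 1) then 1 else 0) := by
  simp only [cntValid, List.range_succ, List.countP_append, List.countP_cons, List.countP_nil]
  by_cases h : validB (i + 1) <;> simp [h]

theorem cntValid_mono {i j : Nat} (h : i ≤ j) : cntValid i ≤ cntValid j :=
  ((List.range_sublist).2 h).countP_le

theorem cntValid_gap {a b : Nat} (hab : a ≤ b)
    (h : ∀ u, a < u → u ≤ b → validB u = false) : cntValid b = cntValid a := by
  induction b with
  | zero =>
    have ha : a = 0 := by omega
    rw [ha]
  | succ b ih =>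
    rcases Nat.lt_or_ge a (b+1) with hlt | hge
    · have hb : a ≤ b := by omega
      rw [cntValid_succ, h (b+1) (by omega) (by omega)]
      simpa using ih hb (fun u hu hub => h u hu (by omega))
    · have : a = b + 1 := by omega
      rw [this]

theorem cnt_lt_of_valid {x y : Nat} (hx : validB x = true) (hyx : y < x) :
    cntValid y < cntValid x := by
  have hx1 : x = (x - 1) + 1 := by omega
  have : cntValid x = cntValid (x-1) + 1 := by
    rw [hx1, cntValid_succ, ← hx1, hx]; simp
  have h2 : cntValid y ≤ cntValid (x-1) := cntValid_mono (by omega)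
  omega

theorem searchValid_spec : ∀ f c, (∃ v, c ≤ v ∧ v < c + f ∧ validB v = true) →
    validB (searchValid f c) = true ∧ c ≤ searchValid f c ∧
      ∀ u, c ≤ u → u < searchValid f c → validB u = false := by
  intro f
  induction f with
  | zero => rintro c ⟨v, h1, h2, _⟩; omega
  | succ f ih =>
    rintro c ⟨v, h1, h2, h3⟩
    by_cases hc : validB c
    · refine ⟨by simp [searchValid, hc], by simp [searchValid, hc], ?_⟩
      intro u hu hu2
      simp [searchValid, hc] at hu2
      omega
    · have hvc : v ≠ c := fun he => hc (he ▸ h3)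
      have ⟨r1, r2, r3⟩ := ih (c+1) ⟨v, by omega, by omega, h3⟩
      have hs : searchValid (f+1) c = searchValid f (c+1) := by
        simp [searchValid, hc]
      refine ⟨hs ▸ r1, by omega, ?_⟩
      intro u hu hu2
      rw [hs] at hu2
      rcases Nat.eq_or_lt_of_le hu with he | hlt
      · simpa [← he] using hc
      · exact r3 u (by omega) hu2

theorem hasThree_pow (m : Nat) : hasThree (10 ^ m) = false := by
  induction m with
  | zero => rw [pow_zero, hasThree_lt (by omega)]; decide
  | succ m ih =>
    have h10 : (10:Nat) ^ (m+1) = 10 * 10 ^ m := by ring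
    have hge : 10 ≤ (10:Nat) ^ (m+1) := by
      have : 1 ≤ (10:Nat) ^ m := Nat.one_le_pow _ _ (by omega)
      omega
    rw [hasThree_ge hge]
    have h1 : (10:Nat) ^ (m+1) % 10 = 0 := by omega
    have h2 : (10:Nat) ^ (m+1) / 10 = 10 ^ m := by omega
    rw [h1, h2, ih]
    decide

theorem validB_pow_succ (m : Nat) : validB (10 ^ m + 1) = true := by
  have hmod : (10:Nat) ^ m % 3 = 1 := by
    rw [Nat.pow_mod]; simp
  have h3 : hasThree (10 ^ m + 1) = false := by
    cases m with
    | zero => rw [hasThree_lt (by omega)]; decide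
    | succ m =>
      have h10 : (10:Nat) ^ (m+1) = 10 * 10 ^ m := by ring
      have hp : 1 ≤ (10:Nat) ^ m := Nat.one_le_pow _ _ (by omega)
      have hge : 10 ≤ (10:Nat) ^ (m+1) + 1 := by omega
      rw [hasThree_ge hge]
      have h1 : ((10:Nat) ^ (m+1) + 1) % 10 = 1 := by omega
      have h2 : ((10:Nat) ^ (m+1) + 1) / 10 = 10 ^ m := by omega
      rw [h1, h2, hasThree_pow]
      decide
  unfold validB
  rw [h3]
  simp
  omega

theorem nextValid_spec (m : Nat) :
    m < nextValid m ∧ validB (nextValid m) = true ∧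
      ∀ u, m < u → u < nextValid m → validB u = false := by
  have hex : ∃ v, m + 1 ≤ v ∧ v < m + 1 + (9 * m + 2) ∧ validB v = true := by
    rcases Nat.eq_zero_or_pos m with hm0 | hm1
    · exact ⟨1, by omega, by omega, by decide⟩
    · refine ⟨10 ^ (Nat.log 10 m + 1) + 1, ?_, ?_, validB_pow_succ _⟩
      · have := Nat.lt_pow_succ_log_self (by omega : 1 < 10) m
        omega
      · have h1 : 10 ^ Nat.log 10 m ≤ m := Nat.pow_log_le_self 10 (by omega)
        have h2 : (10:Nat) ^ (Nat.log 10 m + 1) = 10 * 10 ^ Nat.log 10 m := by ring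
        omega
  have ⟨r1, r2, r3⟩ := searchValid_spec (9 * m + 2) (m + 1) hex
  exact ⟨by unfold nextValid; omega, r1, fun u hu hu2 => r3 u (by omega) hu2⟩

theorem nthValidGo_comm : ∀ (k acc : Nat),
    nthValidGo k (nextValid acc) = nextValid (nthValidGo k acc) := by
  intro k
  induction k with
  | zero => intro acc; rfl
  | succ k ih => intro acc; exact ih (nextValid acc)

theorem nthValid_succ (k : Nat) : nthValid (k + 1) = nextValid (nthValid k) :=
  nthValidGo_comm k 0

theorem nthValid_spec (k : Nat) :
    cntValid (nthValid k) = k ∧ (0 < k → validB (nthValid k) = true) := by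
  induction k with
  | zero => exact ⟨by simp [nthValid, nthValidGo, cntValid], by omega⟩
  | succ k ih =>
    have ⟨h1, h2, h3⟩ := nextValid_spec (nthValid k)
    have hw : nthValid (k+1) = nextValid (nthValid k) := nthValid_succ k
    set v := nthValid k
    set w := nextValid v with hwdef
    have hw1 : w = (w - 1) + 1 := by omega
    have hcnt : cntValid w = cntValid (w - 1) + 1 := by
      rw [hw1, cntValid_succ, ← hw1, h2]; simp
    have hgap : cntValid (w - 1) = cntValid v := by
      apply cntValid_gap (by omega)
      intro u hu hub
      exact h3 u hu (by omega)
    refine ⟨?_, fun _ => hw ▸ h2⟩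
    rw [hw, hcnt, hgap, ih.1]

theorem nthValid_unique {v : Nat} (hv : validB v = true) : nthValid (cntValid v) = v := by
  have hv0 : v ≠ 0 := by
    intro h
    rw [h] at hv
    simp [validB] at hv
  set k := cntValid v with hk
  have ⟨h1, h2⟩ := nthValid_spec k
  set w := nthValid k
  have hk1 : 0 < k := by
    rw [hk]
    calc 0 = cntValid 0 := by simp [cntValid]
    _ < cntValid v := cnt_lt_of_valid hv (by omega)
  rcases Nat.lt_trichotomy w v with h | h | h
  · have := cnt_lt_of_valid hv h
    omega
  · omega
  · have := cnt_lt_of_valid (h2 hk1) h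
    omega

-- ---- A's loop reaches nthValid ----
theorem loopA_step (f : Nat) (i r : Int) :
    loopA (f + 1) i r =
      (if (i + 1) == (if PySem.Str.isIn "3" (PySem.Int.toStr (i + 1)) || (PySem.Int.mod (i + 1) 3 == 0) then r + 1 else r)
       then (if PySem.Str.isIn "3" (PySem.Int.toStr (i + 1)) || (PySem.Int.mod (i + 1) 3 == 0) then r + 1 else r)
       else loopA f (i + 1) (if PySem.Str.isIn "3" (PySem.Int.toStr (i + 1)) || (PySem.Int.mod (i + 1) 3 == 0) then r + 1 else r)) := rfl

theorem loopA_eq (n : Int) (hn : 1 ≤ n) : ∀ f (i : Nat), cntValid i < n.toNat →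
    nthValid n.toNat ≤ i + f →
    loopA f (i : Int) (n + (i : Int) - (cntValid i : Int)) = (nthValid n.toNat : Int) := by
  have hcast : (n.toNat : Int) = n := Int.toNat_of_nonneg (by omega)
  intro f
  induction f with
  | zero =>
    intro i hcnt hf
    exfalso
    have h1 := (nthValid_spec n.toNat).1
    have h2 := cntValid_mono (show nthValid n.toNat ≤ i by omega)
    omega
  | succ f ih =>
    intro i hcnt hf
    have hi1 : ((i : Int) + 1) = ((i + 1 : Nat) : Int) := by push_cast; ring
    rw [loopA_step, hi1, cursed_eq (i + 1)]
    cases hb : validB (i + 1) with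
    | false =>
      have hcnt' : cntValid (i + 1) = cntValid i := by rw [cntValid_succ, hb]; simp
      have hr1 : n + (i : Int) - (cntValid i : Int) + 1
          = n + ((i + 1 : Nat) : Int) - (cntValid (i + 1) : Int) := by
        rw [hcnt']; push_cast; ring
      simp only [Bool.not_false, if_true, hr1]
      have hcond : (((i + 1 : Nat) : Int) == n + ((i + 1 : Nat) : Int) - (cntValid (i + 1) : Int)) = false := by
        rw [beq_eq_false_iff_ne]
        intro he
        have : (cntValid (i + 1) : Int) = n := by omega
        omega
      rw [hcond, if_neg (by simp)]
      exact ih (i + 1) (by omega) (by omega)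
    | true =>
      have hcnt' : cntValid (i + 1) = cntValid i + 1 := by rw [cntValid_succ, hb]; simp
      have hr1 : n + (i : Int) - (cntValid i : Int)
          = n + ((i + 1 : Nat) : Int) - (cntValid (i + 1) : Int) := by
        rw [hcnt']; push_cast; ring
      simp only [Bool.not_true, Bool.false_eq_true, if_false, hr1]
      by_cases hEq : cntValid (i + 1) = n.toNat
      · have hcond : (((i + 1 : Nat) : Int) == n + ((i + 1 : Nat) : Int) - (cntValid (i + 1) : Int)) = true := by
          rw [beq_iff_eq]
          omega
        rw [hcond, if_pos rfl]
        have huniq := nthValid_unique hb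
        rw [hEq] at huniq
        rw [huniq]
        omega
      · have hcond : (((i + 1 : Nat) : Int) == n + ((i + 1 : Nat) : Int) - (cntValid (i + 1) : Int)) = false := by
          rw [beq_eq_false_iff_ne]
          intro he
          have : (cntValid (i + 1) : Int) = n := by omega
          omega
        rw [hcond, if_neg (by simp)]
        exact ih (i + 1) (by omega) (by omega)

theorem solution_eq (n : Int) (hn : 1 ≤ n) : solution n = (nthValid n.toNat : Int) := by
  have h0 : cntValid 0 = 0 := by simp [cntValid]
  have := loopA_eq n hn (nthValid n.toNat + 1) 0 (by
      rw [h0]; omega) (by omega)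
  rw [h0] at this
  simpa [solution] using this

-- ---- B's increment steps through the 3-free numbers ----
def Free (ds : List Int) : Prop := ∀ d ∈ ds, 0 ≤ d ∧ d < 10 ∧ d ≠ 3

def inc : List Int → List Int
  | [] => [1]
  | d :: t => if d = 9 then 0 :: inc t else (if d = 2 then 4 else d + 1) :: t

def valN : List Int → Nat
  | [] => 0
  | d :: t => d.toNat + 10 * valN t

theorem incGo_cons (d : Int) (t : List Int) (s : Int) :
    incGo (d :: t) s =
      (if (if d + 1 == 3 then (4:Int) else d + 1) == 10 then
        (0 :: (incGo t (PySem.Int.mod (s - 9) 3)).1, (incGo t (PySem.Int.mod (s - 9) 3)).2)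
      else ((if d + 1 == 3 then (4:Int) else d + 1) :: t,
            PySem.Int.mod (s + (if d + 1 == 3 then (4:Int) else d + 1) - d) 3)) := rfl

theorem incGo_eq : ∀ (ds : List Int) (s : Int), s = ds.sum % 3 →
    incGo ds s = (inc ds, (inc ds).sum % 3) := by
  intro ds
  induction ds with
  | nil =>
    intro s hs
    simp only [List.sum_nil] at hs
    simp [incGo, inc, hs]
  | cons d t ih =>
    intro s hs
    simp only [List.sum_cons] at hs
    rw [incGo_cons]
    by_cases h9 : d = 9
    · subst h9
      have hs' : PySem.Int.mod (s - 9) 3 = t.sum % 3 := by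
        rw [PySem.Int.mod_eq_emod_of_pos (by omega)]
        omega
      simp only [show ((9:Int) + 1 == 3) = false from by decide, Bool.false_eq_true, if_false,
                 show ((9:Int) + 1 == 10) = true from by decide, if_true]
      rw [ih _ hs']
      simp [inc]
    · by_cases h2 : d = 2
      · subst h2
        simp only [show ((2:Int) + 1 == 3) = true from by decide, if_true,
                   show ((4:Int) == 10) = false from by decide, Bool.false_eq_true, if_false]
        rw [show inc (2 :: t) = 4 :: t from by simp [inc]]
        rw [PySem.Int.mod_eq_emod_of_pos (by omega)]
        simp only [List.sum_cons, Prod.mk.injEq, true_and]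
        omega
      · have hne3 : (d + 1 == (3:Int)) = false := by
          rw [beq_eq_false_iff_ne]; omega
        have h10 : d + 1 ≠ (10:Int) := by omega
        have hne10 : (d + 1 == (10:Int)) = false := by
          rw [beq_eq_false_iff_ne]; exact h10
        simp only [hne3, Bool.false_eq_true, if_false, hne10]
        rw [show inc (d :: t) = (d + 1) :: t from by simp [inc, h9, h2]]
        rw [PySem.Int.mod_eq_emod_of_pos (by omega)]
        simp only [List.sum_cons, Prod.mk.injEq, true_and]
        omega

theorem inc_free {ds : List Int} (h : Free ds) : Free (inc ds) := by
  induction ds with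
  | nil => intro d hd; simp [inc] at hd; omega
  | cons d t ih =>
    have hd := h d (List.mem_cons_self ..)
    have ht : Free t := fun x hx => h x (List.mem_cons_of_mem _ hx)
    intro x hx
    by_cases h9 : d = 9
    · simp only [inc, h9, if_true] at hx
      rcases List.mem_cons.1 hx with h0 | h0
      · omega
      · exact ih ht x h0
    · simp only [inc, if_neg h9] at hx
      rcases List.mem_cons.1 hx with h0 | h0
      · by_cases h2 : d = 2 <;> simp [h2] at h0 <;> omega
      · exact ht x h0

theorem val_lt_inc : ∀ {ds : List Int}, Free ds → valN ds < valN (inc ds) := by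
  intro ds
  induction ds with
  | nil => intro _; simp [inc, valN]
  | cons d t ih =>
    intro h
    have hd := h d (List.mem_cons_self ..)
    have ht : Free t := fun x hx => h x (List.mem_cons_of_mem _ hx)
    have iht := ih ht
    by_cases h9 : d = 9
    · rw [show inc (d :: t) = 0 :: inc t from by simp [inc, h9]]
      simp only [valN, h9]
      have : ((9:Int)).toNat = 9 := rfl
      have : ((0:Int)).toNat = 0 := rfl
      omega
    · by_cases h2 : d = 2
      · rw [show inc (d :: t) = 4 :: t from by simp [inc, h2]]
        simp only [valN, h2]
        have : ((2:Int)).toNat = 2 := rfl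
        have : ((4:Int)).toNat = 4 := rfl
        omega
      · rw [show inc (d :: t) = (d + 1) :: t from by simp [inc, h9, h2]]
        simp only [valN]
        omega

theorem between_hasThree : ∀ (ds : List Int), Free ds → ∀ u : Nat,
    valN ds < u → u < valN (inc ds) → hasThree u = true := by
  intro ds
  induction ds with
  | nil =>
    intro _ u h1 h2
    simp [valN] at h1
    simp [inc, valN] at h2
    omega
  | cons d t ih =>
    intro h u h1 h2
    have hd := h d (List.mem_cons_self ..)
    have ht : Free t := fun x hx => h x (List.mem_cons_of_mem _ hx)
    by_cases h9 : d = 9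
    · rw [show inc (d :: t) = 0 :: inc t from by simp [inc, h9]] at h2
      simp only [valN, h9] at h1 h2
      have h9t : (9:Int).toNat = 9 := rfl
      rw [h9t] at h1
      have hzt : (0:Int).toNat = 0 := rfl
      rw [hzt] at h2
      have hvt := val_lt_inc ht
      have hq1 : valN t < u / 10 := by omega
      have hq2 : u / 10 < valN (inc t) := by omega
      have hu10 : 10 ≤ u := by omega
      rw [hasThree_ge hu10, ih ht (u / 10) hq1 hq2]
      simp
    · by_cases h2d : d = 2
      · rw [show inc (d :: t) = 4 :: t from by simp [inc, h2d]] at h2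
        simp only [valN, h2d] at h1 h2
        have h2t : (2:Int).toNat = 2 := rfl
        have h4t : (4:Int).toNat = 4 := rfl
        rw [h2t] at h1
        rw [h4t] at h2
        have hu : u = 3 + 10 * valN t := by omega
        by_cases hv0 : valN t = 0
        · rw [hasThree_lt (by omega)]
          simp
          omega
        · rw [hasThree_ge (by omega)]
          have : u % 10 = 3 := by omega
          rw [this]
          simp
      · exfalso
        rw [show inc (d :: t) = (d + 1) :: t from by simp [inc, h9, h2d]] at h2
        simp only [valN] at h1 h2
        omega

theorem free_hasThree : ∀ (ds : List Int), Free ds → hasThree (valN ds) = false := by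
  intro ds
  induction ds with
  | nil => rw [show valN [] = 0 from rfl, hasThree_lt (by omega)]; simp
  | cons d t ih =>
    intro h
    have hd := h d (List.mem_cons_self ..)
    have ht : Free t := fun x hx => h x (List.mem_cons_of_mem _ hx)
    by_cases hv0 : valN t = 0
    · have : valN (d :: t) = d.toNat := by simp [valN, hv0]
      rw [this, hasThree_lt (by omega)]
      simp
      omega
    · have hge : 10 ≤ valN (d :: t) := by simp only [valN]; omega
      rw [hasThree_ge hge]
      have hm : valN (d :: t) % 10 = d.toNat := by simp only [valN]; omega
      have hdvd : valN (d :: t) / 10 = valN t := by simp only [valN]; omega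
      rw [hm, hdvd, ih ht]
      simp
      omega

theorem free_sum_mod3 : ∀ (ds : List Int), Free ds →
    ((valN ds : Int)) % 3 = ds.sum % 3 := by
  intro ds
  induction ds with
  | nil => simp [valN]
  | cons d t ih =>
    intro h
    have hd := h d (List.mem_cons_self ..)
    have ht : Free t := fun x hx => h x (List.mem_cons_of_mem _ hx)
    have iht := ih ht
    simp only [valN, List.sum_cons]
    push_cast
    have hdt : ((d.toNat : Int)) = d := Int.toNat_of_nonneg hd.1
    rw [hdt]
    omega

theorem foldl_rev_valN : ∀ (ds : List Int), Free ds →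
    ds.reverse.foldl (fun v d => 10 * v + d) 0 = (valN ds : Int) := by
  have hstep : ∀ (t : List Int) (d : Int) (a : Int),
      (d :: t).reverse.foldl (fun v d => 10 * v + d) a
        = 10 * (t.reverse.foldl (fun v d => 10 * v + d) a) + d := by
    intro t d a
    rw [List.reverse_cons, List.foldl_append]
    rfl
  intro ds
  induction ds with
  | nil => intro _; rfl
  | cons d t ih =>
    intro h
    have hd := h d (List.mem_cons_self ..)
    have ht : Free t := fun x hx => h x (List.mem_cons_of_mem _ hx)
    rw [hstep, ih ht]
    simp only [valN]
    push_cast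
    have hdt : ((d.toNat : Int)) = d := Int.toNat_of_nonneg hd.1
    rw [hdt]
    ring

theorem loopB_done (n : Int) (f : Nat) (ds : List Int) (s count : Int) (h : ¬ count < n) :
    loopB n f ds s count = ds.reverse.foldl (fun v d => 10 * v + d) 0 := by
  cases f <;> simp [loopB, h]

theorem loopB_step (n : Int) (f : Nat) (ds : List Int) (s count : Int) :
    loopB n (f + 1) ds s count =
      if count < n then
        loopB n f (incGo ds s).1 (incGo ds s).2
          (if (incGo ds s).2 == 0 then count else count + 1)
      else ds.reverse.foldl (fun v d => 10 * v + d) 0 := rfl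

theorem loopB_eq (n : Int) (hn : 1 ≤ n) : ∀ f (ds : List Int) (s : Int), Free ds →
    s = ds.sum % 3 → cntValid (valN ds) < n.toNat → nthValid n.toNat ≤ valN ds + f →
    loopB n f ds s (cntValid (valN ds) : Int) = (nthValid n.toNat : Int) := by
  have hcast : (n.toNat : Int) = n := Int.toNat_of_nonneg (by omega)
  intro f
  induction f with
  | zero =>
    intro ds s _ _ hcnt hf
    exfalso
    have h1 := (nthValid_spec n.toNat).1
    have h2 := cntValid_mono (show nthValid n.toNat ≤ valN ds by omega)
    omega
  | succ f ih =>
    intro ds s hFree hs hcnt hf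
    have hfree' := inc_free hFree
    have hv'gt := val_lt_inc hFree
    rw [loopB_step, if_pos (by omega : ((cntValid (valN ds) : Int)) < n), incGo_eq ds s hs]
    simp only
    have hsum : (inc ds).sum % 3 = ((valN (inc ds) : Int)) % 3 := (free_sum_mod3 _ hfree').symm
    have hcnt_gap : cntValid (valN (inc ds) - 1) = cntValid (valN ds) := by
      apply cntValid_gap (by omega)
      intro u hu hub
      have := between_hasThree ds hFree u hu (by omega)
      simp [validB, this]
    have hv1 : valN (inc ds) = (valN (inc ds) - 1) + 1 := by omega
    have hcnt_step : cntValid (valN (inc ds))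
        = cntValid (valN ds) + (if validB (valN (inc ds)) then 1 else 0) := by
      rw [hv1, cntValid_succ, ← hv1, hcnt_gap]
    have h3f : hasThree (valN (inc ds)) = false := free_hasThree _ hfree'
    have hval3 : validB (valN (inc ds)) = decide (valN (inc ds) % 3 ≠ 0) := by
      simp [validB, h3f]
    have hmodcast : ((valN (inc ds) : Int)) % 3 = ((valN (inc ds) % 3 : Nat) : Int) := by
      push_cast; ring
    by_cases hz : valN (inc ds) % 3 = 0
    · have hcond : (((inc ds).sum % 3) == (0:Int)) = true := by
        rw [hsum, hmodcast, hz]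
        simp
      rw [hcond, if_pos rfl]
      have hvB : validB (valN (inc ds)) = false := by rw [hval3]; simp [hz]
      have hcnt' : cntValid (valN (inc ds)) = cntValid (valN ds) := by
        rw [hcnt_step, hvB]; simp
      have := ih (inc ds) ((inc ds).sum % 3) hfree' rfl (by omega) (by omega)
      rw [hcnt'] at this
      exact this
    · have hcond : (((inc ds).sum % 3) == (0:Int)) = false := by
        rw [hsum, hmodcast, beq_eq_false_iff_ne]
        intro he
        have : (valN (inc ds) % 3 : Nat) = 0 := by exact_mod_cast he
        omega
      rw [hcond]
      simp only [Bool.false_eq_true, if_false]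
      have hvB : validB (valN (inc ds)) = true := by rw [hval3]; simp [hz]
      have hcnt' : cntValid (valN (inc ds)) = cntValid (valN ds) + 1 := by
        rw [hcnt_step, hvB]; simp
      have hcount1 : ((cntValid (valN ds) : Int)) + 1 = ((cntValid (valN (inc ds)) : Int)) := by
        rw [hcnt']; push_cast; ring
      rw [hcount1]
      by_cases hN : cntValid (valN (inc ds)) = n.toNat
      · rw [loopB_done n f _ _ _ (by rw [hN]; omega), foldl_rev_valN _ hfree']
        have huniq := nthValid_unique hvB
        rw [hN] at huniq
        rw [huniq]
      · exact ih (inc ds) ((inc ds).sum % 3) hfree' rfl (by omega) (by omega)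

theorem solution_alt_eq (n : Int) (hn : 1 ≤ n) : solution_alt n = (nthValid n.toNat : Int) := by
  have hfree0 : Free [(0:Int)] := by
    intro d hd
    simp at hd
    omega
  have hval0 : valN [(0:Int)] = 0 := rfl
  have hcnt0 : cntValid 0 = 0 := by simp [cntValid]
  have := loopB_eq n hn (nthValid n.toNat + 1) [(0:Int)] 0 hfree0 (by simp) (by
      rw [hval0, hcnt0]; omega) (by rw [hval0]; omega)
  rw [hval0, hcnt0] at this
  simpa [solution_alt] using this

-- ===== VERDICT (by name: the statement is the Claim_ definition above) =====
theorem solution_spec : Claim_equal_solution := by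
  intro n _ hpre
  unfold Spec_solution
  rw [solution_eq n hpre, solution_alt_eq n hpre]
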